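-- pv_equiv track=rewrite | github.com/lmmsoft/LeetCode | LeetCode-Algorithm/1297. Maximum Number of Occurrences of a Substring/1297.py | maxFreq2
-- ===== SOURCE A (Python) =====
-- from collections import defaultdict
--
-- def maxFreq2(s: str, maxLetters: int, minSize: int, maxSize: int) -> int:
--     cnt = defaultdict(int)
--     n = len(s)
--     st = ed = 0
--     while st < n:
--         temp = set()
--         while len(temp) <= maxLetters and ed - st <= maxSize and ed <= n:
--             if ed - st >= minSize:
--                 cnt[s[st:ed]] += 1
--             if ed < n:
--                 temp.add(s[ed])
--             ed += 1
--         st += 1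
--         ed = st
--     return max(cnt.values()) if cnt else 0
-- ===== SOURCE B (Python) =====
-- def maxFreq2(s: str, maxLetters: int, minSize: int, maxSize: int) -> int:
--     # Only windows of length exactly minSize need counting: a longer substring
--     # occurs at most as often as its length-minSize prefix, so the maximum is
--     # attained at the shortest admissible length.  A qualifying substring has a
--     # positive length in [minSize, maxSize], so with no such length the answer is 0.
--     if not 0 < minSize <= maxSize:
--         return 0
--     cnt = {}
--     for i in range(len(s) - minSize + 1):
--         w = s[i:i + minSize]
--         if len(set(w)) <= maxLetters:
--             cnt[w] = cnt.get(w, 0) + 1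
--     return max(cnt.values()) if cnt else 0
-- ===== Notes on version B (the rewrite author's own statement) =====
-- stated objective: faster
-- what changed: Instead of A's nested scan counting every substring of every length in [minSize,maxSize], B validates 0 < minSize <= maxSize and then makes one pass counting only windows of length exactly minSize (a longer valid substring occurs at most as often as its length-minSize prefix).
-- intended difference: On degenerate minSize <= 0 (with 0 <= maxLetters, 0 <= maxSize and nonempty s) A returns len(s), the count of the empty slices its scan happens to produce, while B rejects the parameters and returns 0, the intended answer when no positive substring length lies in [minSize, maxSize]. — e.g. on maxFreq2("a", 0, 0, 0): A returns 1, B returns 0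
import Mathlib
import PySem

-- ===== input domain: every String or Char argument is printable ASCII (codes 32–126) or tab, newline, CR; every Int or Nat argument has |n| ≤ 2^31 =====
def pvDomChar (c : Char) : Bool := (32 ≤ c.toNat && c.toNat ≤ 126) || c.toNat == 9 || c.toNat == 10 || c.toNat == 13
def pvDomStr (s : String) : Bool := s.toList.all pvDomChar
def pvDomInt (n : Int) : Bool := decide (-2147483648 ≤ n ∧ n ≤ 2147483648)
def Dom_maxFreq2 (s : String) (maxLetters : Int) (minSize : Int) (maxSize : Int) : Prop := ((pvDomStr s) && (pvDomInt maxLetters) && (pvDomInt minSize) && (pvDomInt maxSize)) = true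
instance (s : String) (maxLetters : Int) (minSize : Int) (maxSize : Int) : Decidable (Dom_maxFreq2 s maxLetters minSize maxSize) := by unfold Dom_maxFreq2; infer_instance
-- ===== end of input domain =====

-- B replaces A's nested all-lengths substring count by a single pass over windows of length
-- exactly minSize (faster, asymptotically fewer windows); on the degenerate inputs of
-- D_maxFreq2 (minSize ≤ 0 with 0 ≤ maxLetters, 0 ≤ maxSize, s ≠ "") the two return
-- different values, stated and proved below.

-- ===== PORT A =====
-- inner 'while len(temp) <= maxLetters and ed - st <= maxSize and ed <= n' loop;
-- fuel bounds the iteration count (the loop itself stops once ed exceeds n).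
def maxFreq2InnerA (cs : List Char) (maxLetters minSize maxSize st : Int)
    (cnt : PySem.Dict String Int) (temp : PySem.Set Char) (ed : Int) :
    Nat → PySem.Dict String Int
  | 0 => cnt
  | fuel+1 =>
    if (temp.length : Int) ≤ maxLetters ∧ ed - st ≤ maxSize ∧ ed ≤ (cs.length : Int) then
      let cnt' := if minSize ≤ ed - st then
          (cnt.modify (String.ofList (PySem.List.slice cs (some st) (some ed))) 0 (· + 1))
        else cnt
      let temp' := if ed < (cs.length : Int) then
          (match PySem.List.pyGet? cs ed with
           | some c => temp.add c
           | none => temp)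
        else temp
      maxFreq2InnerA cs maxLetters minSize maxSize st cnt' temp' (ed + 1) fuel
    else cnt

def maxFreq2 (s : String) (maxLetters : Int) (minSize : Int) (maxSize : Int) : Int :=
  let cs := s.toList
  let n : Int := (cs.length : Int)
  -- outer 'while st < n: … st += 1; ed = st' loop, st = 0,1,…,n-1
  let cnt := (PySem.List.pyRange 0 n 1).foldl
    (fun cnt st =>
      maxFreq2InnerA cs maxLetters minSize maxSize st cnt PySem.Set.empty st (cs.length + 2))
    PySem.Dict.empty
  -- 'max(cnt.values()) if cnt else 0'
  match PySem.List.max? cnt.values (fun v => v) with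
  | some v => v
  | none => 0

-- ===== PORT B =====
def maxFreq2_alt (s : String) (maxLetters : Int) (minSize : Int) (maxSize : Int) : Int :=
  let cs := s.toList
  let n : Int := (cs.length : Int)
  -- 'if not 0 < minSize <= maxSize: return 0'
  if ¬ (0 < minSize ∧ minSize ≤ maxSize) then 0
  else
    let cnt := (PySem.List.pyRange 0 (n - minSize + 1) 1).foldl
      (fun cnt i =>
        let w := String.ofList (PySem.List.slice cs (some i) (some (i + minSize)))
        if ((PySem.Set.ofList w.toList).length : Int) ≤ maxLetters then
          cnt.insert w (cnt.getD w 0 + 1)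
        else cnt)
      (PySem.Dict.empty : PySem.Dict String Int)
    match PySem.List.max? cnt.values (fun v => v) with
    | some v => v
    | none => 0

-- ===== PRECONDITION & SPEC =====
-- On degenerate minSize ≤ 0 (with 0 ≤ maxLetters, 0 ≤ maxSize and s nonempty) A returns
-- len(s), the count of the empty slices its scan happens to produce, while B rejects the
-- parameters (no positive substring length lies in [minSize, maxSize]) and returns 0, the
-- intended answer when no qualifying substring exists.
def D_maxFreq2 (s : String) (maxLetters : Int) (minSize : Int) (maxSize : Int) : Prop :=
  minSize ≤ 0 ∧ 0 ≤ maxLetters ∧ 0 ≤ maxSize ∧ s ≠ "" 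
instance (s : String) (maxLetters : Int) (minSize : Int) (maxSize : Int) : Decidable (D_maxFreq2 s maxLetters minSize maxSize) := by unfold D_maxFreq2; infer_instance

def Spec_maxFreq2 (s : String) (maxLetters : Int) (minSize : Int) (maxSize : Int) (out : Int) : Prop := ¬ D_maxFreq2 s maxLetters minSize maxSize → out = maxFreq2_alt s maxLetters minSize maxSize
instance (s : String) (maxLetters : Int) (minSize : Int) (maxSize : Int) (out : Int) : Decidable (Spec_maxFreq2 s maxLetters minSize maxSize out) := by unfold Spec_maxFreq2; infer_instance

def pvDiffWitness_maxFreq2 : String × Int × Int × Int := ("a", 0, 0, 0)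
def pvDiffWitnessOut_maxFreq2 : Int × Int := (1, 0)

-- ===== CLAIM (what is proved, stated in full; the proofs are below) =====
def Claim_unchanged_maxFreq2 : Prop := ∀ (s : String) (maxLetters : Int) (minSize : Int) (maxSize : Int), Dom_maxFreq2 s maxLetters minSize maxSize → Spec_maxFreq2 s maxLetters minSize maxSize (maxFreq2 s maxLetters minSize maxSize)
def Claim_changed_maxFreq2 : Prop := Dom_maxFreq2 (pvDiffWitness_maxFreq2.1) (pvDiffWitness_maxFreq2.2.1) (pvDiffWitness_maxFreq2.2.2.1) (pvDiffWitness_maxFreq2.2.2.2) ∧ D_maxFreq2 (pvDiffWitness_maxFreq2.1) (pvDiffWitness_maxFreq2.2.1) (pvDiffWitness_maxFreq2.2.2.1) (pvDiffWitness_maxFreq2.2.2.2) ∧ maxFreq2 (pvDiffWitness_maxFreq2.1) (pvDiffWitness_maxFreq2.2.1) (pvDiffWitness_maxFreq2.2.2.1) (pvDiffWitness_maxFreq2.2.2.2) = pvDiffWitnessOut_maxFreq2.1 ∧ maxFreq2_alt (pvDiffWitness_maxFreq2.1) (pvDiffWitness_maxFreq2.2.1) (pvDiffWitness_maxFreq2.2.2.1)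 (pvDiffWitness_maxFreq2.2.2.2) = pvDiffWitnessOut_maxFreq2.2 ∧ pvDiffWitnessOut_maxFreq2.1 ≠ pvDiffWitnessOut_maxFreq2.2
def Claim_exact_maxFreq2 : Prop := ∀ (s : String) (maxLetters : Int) (minSize : Int) (maxSize : Int), Dom_maxFreq2 s maxLetters minSize maxSize → D_maxFreq2 s maxLetters minSize maxSize → maxFreq2 s maxLetters minSize maxSize ≠ maxFreq2_alt s maxLetters minSize maxSize

-- ===== LEMMAS AND PROOFS =====

-- proof-side vocabulary: windows of the string, distinct-char count, occurrence lists

def pvWin (cs : List Char) (st L : Int) : List Char := (cs.drop st.toNat).take L.toNat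

def pvD (w : List Char) : Int := ((PySem.Set.ofList w).length : Int)

-- the condition under which A counts the window starting at st of length L
def pvCondF (cs : List Char) (maxLetters minSize maxSize st L : Int) : Bool :=
  decide (pvD (pvWin cs st L) ≤ maxLetters) && decide (L ≤ maxSize) && decide (minSize ≤ L)

def pvKeysA (cs : List Char) (maxLetters minSize maxSize st : Int) : List String :=
  ((PySem.List.pyRange 0 ((cs.length : Int) - st + 1) 1).filter
      (pvCondF cs maxLetters minSize maxSize st)).map
    (fun L => String.ofList (pvWin cs st L))

def pvOccA (cs : List Char) (maxLetters minSize maxSize : Int) : List String :=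
  (PySem.List.pyRange 0 (cs.length : Int) 1).flatMap (pvKeysA cs maxLetters minSize maxSize)

-- B's window at start i: the actual Python slice s[i:i+minSize]
def pvWinS (cs : List Char) (m i : Int) : List Char :=
  PySem.List.slice cs (some i) (some (i + m))

def pvPredB (cs : List Char) (maxLetters m : Int) (i : Int) : Bool :=
  decide (pvD (pvWinS cs m i) ≤ maxLetters)

-- B's occurrence list: slices of length m at starts 0..hi-1 passing the distinct test
def pvOccB (cs : List Char) (maxLetters m hi : Int) : List String :=
  ((PySem.List.pyRange 0 hi 1).filter (pvPredB cs maxLetters m)).map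
    (fun i => String.ofList (pvWinS cs m i))

def pvMval (xs : List String) : Int :=
  match PySem.List.max? (PySem.Dict.counter xs).values (fun v => v) with
  | some v => v
  | none => 0

-- distinct-char count is monotone under prefixes
theorem pvD_subset_le (xs ys : List Char) (h : ∀ c ∈ xs, c ∈ ys) : pvD xs ≤ pvD ys := by
  unfold pvD
  have hsub : PySem.Set.ofList xs ⊆ PySem.Set.ofList ys := by
    intro c hc
    rw [PySem.Set.mem_ofList] at hc ⊢
    exact h c hc
  have := List.Nodup.subperm (PySem.Set.nodup_ofList xs) hsub
  exact_mod_cast this.length_le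

theorem pvD_nonneg (w : List Char) : 0 ≤ pvD w := by unfold pvD; positivity

theorem pvD_win_mono (cs : List Char) (st : Int) {L L' : Int} (h : L ≤ L') :
    pvD (pvWin cs st L) ≤ pvD (pvWin cs st L') := by
  apply pvD_subset_le
  intro c hc
  unfold pvWin at hc ⊢
  have hLL : L.toNat ≤ L'.toNat := by omega
  have : List.take L.toNat (cs.drop st.toNat)
      = List.take L.toNat (List.take L'.toNat (cs.drop st.toNat)) := by
    rw [List.take_take, Nat.min_eq_left hLL]
  rw [this] at hc
  exact List.mem_of_mem_take hc

theorem pvSet_ofList_append_singleton {α : Type} [BEq α] (xs : List α) (c : α) :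
    PySem.Set.ofList (xs ++ [c]) = PySem.Set.add (PySem.Set.ofList xs) c := by
  simp [PySem.Set.ofList_eq_foldl, List.foldl_append]

-- for 0 ≤ i, the Python slice s[i:i+m] (with 0 ≤ i+m) is the take/drop window
theorem pvWinS_eq_win (cs : List Char) (m i : Int) (hi : 0 ≤ i) (him : 0 ≤ i + m) :
    pvWinS cs m i = pvWin cs i m := by
  unfold pvWinS pvWin
  rw [PySem.List.slice_toNat cs hi him]
  congr 1
  omega

-- the inner while loop of A, from an arbitrary reached state, folds the remaining keys
theorem pvInnerA_spec (cs : List Char) (maxLetters minSize maxSize : Int) :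
    ∀ (fuel : Nat) (st L : Int) (cnt : PySem.Dict String Int),
      0 ≤ st → 0 ≤ L → st + L ≤ (cs.length : Int) + 1 →
      ((cs.length : Int) + 2 - (st + L)).toNat ≤ fuel →
      maxFreq2InnerA cs maxLetters minSize maxSize st cnt
          (PySem.Set.ofList (pvWin cs st L)) (st + L) fuel
        = (((PySem.List.pyRange L ((cs.length : Int) - st + 1) 1).filter
              (pvCondF cs maxLetters minSize maxSize st)).map
            (fun L' => String.ofList (pvWin cs st L'))).foldl
            (fun d k => d.modify k 0 (· + 1)) cnt := by
  intro fuel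
  induction fuel with
  | zero =>
    intro st L cnt hst hL hle hfuel
    omega
  | succ fuel ih =>
    intro st L cnt hst hL hle hfuel
    rw [maxFreq2InnerA]
    by_cases hcond : ((PySem.Set.ofList (pvWin cs st L)).length : Int) ≤ maxLetters ∧
        st + L - st ≤ maxSize ∧ st + L ≤ (cs.length : Int)
    · rw [if_pos hcond]
      obtain ⟨hc1, hc2, hc3⟩ := hcond
      have hc2' : L ≤ maxSize := by omega
      -- the key A counts (if long enough) is the current window
      have hkey : PySem.List.slice cs (some st) (some (st + L)) = pvWin cs st L := by
        rw [PySem.List.slice_toNat cs hst (by omega)]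
        unfold pvWin
        congr 1
        omega
      -- temp update yields the set of the one-longer window
      have htemp : (if st + L < (cs.length : Int) then
            (match PySem.List.pyGet? cs (st + L) with
             | some c => (PySem.Set.ofList (pvWin cs st L)).add c
             | none => PySem.Set.ofList (pvWin cs st L))
          else PySem.Set.ofList (pvWin cs st L)) = PySem.Set.ofList (pvWin cs st (L + 1)) := by
        have hL1 : (L + 1).toNat = L.toNat + 1 := by omega
        by_cases hlt : st + L < (cs.length : Int)
        · rw [if_pos hlt]
          have hidx : (st + L) = (((st.toNat + L.toNat : Nat) : Int)) := by omega
          have hidxlt : st.toNat + L.toNat < cs.length := by omega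
          rw [hidx, PySem.List.pyGet?_natCast]
          have hget : cs[(st.toNat + L.toNat : Nat)]? = some cs[st.toNat + L.toNat] :=
            List.getElem?_eq_getElem hidxlt
          rw [hget]
          have hwin : pvWin cs st (L + 1) = pvWin cs st L ++ [cs[st.toNat + L.toNat]] := by
            unfold pvWin
            rw [hL1, List.take_add_one, List.getElem?_drop, hget]
            rfl
          rw [hwin, pvSet_ofList_append_singleton]
        · rw [if_neg hlt]
          have hwin : pvWin cs st (L + 1) = pvWin cs st L := by
            unfold pvWin
            have hlen : (cs.drop st.toNat).length ≤ L.toNat := by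
              rw [List.length_drop]; omega
            rw [List.take_of_length_le hlen, List.take_of_length_le (by omega)]
          rw [hwin]
      -- the range on the right starts with L
      have hrange : PySem.List.pyRange L ((cs.length : Int) - st + 1) 1
          = L :: PySem.List.pyRange (L + 1) ((cs.length : Int) - st + 1) 1 :=
        PySem.List.pyRange_one_cons (by omega)
      have hcf : pvCondF cs maxLetters minSize maxSize st L = decide (minSize ≤ L) := by
        unfold pvCondF
        simp [pvD, hc1, hc2']
      have hrec := ih st (L + 1) (if minSize ≤ st + L - st then
          (cnt.modify (String.ofList (PySem.List.slice cs (some st) (some (st + L)))) 0 (· + 1))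
        else cnt) hst (by omega) (by omega) (by omega)
      have hstL : st + L + 1 = st + (L + 1) := by ring
      rw [hstL, htemp, hrec, hrange, List.filter_cons, hcf]
      by_cases hmin : minSize ≤ L
      · simp only [show minSize ≤ st + L - st ↔ minSize ≤ L from by omega, hmin,
          if_pos, decide_true, List.map_cons, List.foldl_cons, hkey]
      · simp only [show minSize ≤ st + L - st ↔ minSize ≤ L from by omega, hmin,
          decide_false, Bool.false_eq_true, if_false]
    · rw [if_neg hcond]
      have hfilter : (PySem.List.pyRange L ((cs.length : Int) - st + 1) 1).filter
          (pvCondF cs maxLetters minSize maxSize st) = [] := by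
        rw [List.filter_eq_nil_iff]
        intro L' hL'
        rw [PySem.List.mem_pyRange_one] at hL'
        unfold pvCondF
        have hstL' : st + L ≤ (cs.length : Int) := by omega
        have : ¬ (pvD (pvWin cs st L) ≤ maxLetters) ∨ ¬ (L ≤ maxSize) := by
          rcases not_and_or.mp hcond with h | h
          · left; exact h
          · rcases not_and_or.mp h with h' | h'
            · right; omega
            · omega
        rcases this with h | h
        · have := pvD_win_mono cs st (L := L) (L' := L') (by omega)
          simp [show ¬ (pvD (pvWin cs st L') ≤ maxLetters) from by omega]
        · simp [show ¬ (L' ≤ maxSize) from by omega]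
      rw [hfilter]
      rfl

theorem pvFoldl_flatMap {α β γ : Type} (l : List α) (f : α → List β) (g : γ → β → γ) (init : γ) :
    l.foldl (fun d x => (f x).foldl g d) init = (l.flatMap f).foldl g init := by
  induction l generalizing init with
  | nil => rfl
  | cons x t ih => simp [List.flatMap_cons, List.foldl_append, ih]

theorem pvFoldl_if_filter {α γ : Type} (l : List α) (P : α → Prop) [DecidablePred P]
    (g : γ → α → γ) (init : γ) :
    l.foldl (fun d x => if P x then g d x else d) init
      = (l.filter (fun x => decide (P x))).foldl g init := by
  induction l generalizing init with
  | nil => rfl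
  | cons x t ih =>
    by_cases hx : P x <;> simp [hx, ih]

theorem pvCountP_eq_single {α : Type} [DecidableEq α] (l : List α) (hnd : l.Nodup) (p : α → Bool) (a : α)
    (h : ∀ x ∈ l, p x = true → x = a) :
    l.countP p = if a ∈ l ∧ p a = true then 1 else 0 := by
  induction l with
  | nil => simp
  | cons x t ih =>
    have hx := h x (List.mem_cons_self)
    have ht : ∀ y ∈ t, p y = true → y = a := fun y hy => h y (List.mem_cons_of_mem _ hy)
    rcases List.nodup_cons.mp hnd with ⟨hxt, hndt⟩
    rw [List.countP_cons, ih hndt ht]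
    by_cases hpx : p x = true
    · have hxa : x = a := hx hpx
      subst hxa
      simp [hpx, hxt]
    · have : ¬ (x = a ∧ p a = true) := by
        rintro ⟨rfl, hpa⟩; exact hpx hpa
      by_cases hat : a ∈ t <;> simp_all

theorem pvSum_indicator_eq_countP {α : Type} (l : List α) (p : α → Bool) :
    (l.map (fun x => if p x then (1 : Nat) else 0)).sum = l.countP p := by
  induction l with
  | nil => rfl
  | cons x t ih =>
    by_cases hx : p x
    · simp [hx, ih]
      omega
    · simp [hx, ih]

theorem pvValues_counter (xs : List String) :
    (PySem.Dict.counter xs).values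
      = (PySem.Set.ofList xs).map (fun k => (List.count k xs : Int)) := by
  have h := PySem.Dict.items_counter xs
  calc (PySem.Dict.counter xs).values
      = (PySem.Dict.counter xs).items.map (·.2) := rfl
    _ = _ := by rw [h, List.map_map]; rfl

theorem pvMval_nonneg (xs : List String) : 0 ≤ pvMval xs := by
  unfold pvMval
  cases h : PySem.List.max? (PySem.Dict.counter xs).values (fun v => v) with
  | none => simp
  | some v =>
    have hv := PySem.List.max?_mem h
    rw [pvValues_counter] at hv
    rcases List.mem_map.mp hv with ⟨k, _, rfl⟩
    positivity

theorem pvMval_count_le (xs : List String) (w : String) (h : w ∈ xs) :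
    (xs.count w : Int) ≤ pvMval xs := by
  have hmem : ((List.count w xs : Int)) ∈ (PySem.Dict.counter xs).values := by
    rw [pvValues_counter]
    exact List.mem_map.mpr ⟨w, (PySem.Set.mem_ofList xs w).mpr h, rfl⟩
  unfold pvMval
  cases hm : PySem.List.max? (PySem.Dict.counter xs).values (fun v => v) with
  | none =>
    rw [PySem.List.max?_eq_none_iff] at hm
    rw [hm] at hmem
    cases hmem
  | some v => exact PySem.List.max?_isMax hm _ hmem

theorem pvMval_exists (xs : List String) (h : xs ≠ []) :
    ∃ w ∈ xs, pvMval xs = (xs.count w : Int) := by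
  unfold pvMval
  cases hm : PySem.List.max? (PySem.Dict.counter xs).values (fun v => v) with
  | none =>
    rw [PySem.List.max?_eq_none_iff, pvValues_counter, List.map_eq_nil_iff] at hm
    rcases List.exists_mem_of_ne_nil xs h with ⟨x, hx⟩
    have : x ∈ PySem.Set.ofList xs := (PySem.Set.mem_ofList xs x).mpr hx
    rw [hm] at this
    cases this
  | some v =>
    have hv := PySem.List.max?_mem hm
    rw [pvValues_counter] at hv
    rcases List.mem_map.mp hv with ⟨k, hk, rfl⟩
    exact ⟨k, (PySem.Set.mem_ofList xs k).mp hk, rfl⟩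

-- A's result is the max count over pvOccA
theorem pvA_eq (s : String) (maxLetters minSize maxSize : Int) :
    maxFreq2 s maxLetters minSize maxSize = pvMval (pvOccA s.toList maxLetters minSize maxSize) := by
  unfold maxFreq2 pvMval
  dsimp only
  have hcong : ∀ (acc : PySem.Dict String Int),
      ∀ st ∈ PySem.List.pyRange 0 (s.toList.length : Int) 1,
      maxFreq2InnerA s.toList maxLetters minSize maxSize st acc PySem.Set.empty st
          (s.toList.length + 2)
        = (pvKeysA s.toList maxLetters minSize maxSize st).foldl
            (fun d k => d.modify k 0 (· + 1)) acc := by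
    intro acc st hst
    rw [PySem.List.mem_pyRange_one] at hst
    have hspec := pvInnerA_spec s.toList maxLetters minSize maxSize
      (s.toList.length + 2) st 0 acc hst.1 le_rfl (by omega) (by omega)
    rw [show st + (0 : Int) = st from by ring] at hspec
    have hempty : PySem.Set.ofList (pvWin s.toList st 0) = PySem.Set.empty := rfl
    rw [hempty] at hspec
    exact hspec
  rw [PySem.List.foldl_congr_mem _ _ _ _ hcong, pvFoldl_flatMap]
  rfl

-- B's result (when the parameters pass B's validity check) is the max count over pvOccB
theorem pvB_eq (s : String) (maxLetters minSize maxSize : Int)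
    (hg : 0 < minSize ∧ minSize ≤ maxSize) :
    maxFreq2_alt s maxLetters minSize maxSize
      = pvMval (pvOccB s.toList maxLetters minSize
          ((s.toList.length : Int) - minSize + 1)) := by
  unfold maxFreq2_alt pvMval
  dsimp only
  rw [if_neg (not_not_intro hg)]
  have hfun : (fun (cnt : PySem.Dict String Int) (i : Int) =>
        let w := String.ofList (PySem.List.slice s.toList (some i) (some (i + minSize)))
        if ((PySem.Set.ofList w.toList).length : Int) ≤ maxLetters then
          cnt.insert w (cnt.getD w 0 + 1)
        else cnt)
      = (fun (cnt : PySem.Dict String Int) (i : Int) =>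
          if pvD (pvWinS s.toList minSize i) ≤ maxLetters then
            cnt.insert (String.ofList (pvWinS s.toList minSize i))
              ((cnt.getD (String.ofList (pvWinS s.toList minSize i)) 0) + 1)
          else cnt) := by
    funext cnt i
    simp only [String.toList_ofList]
    rfl
  rw [hfun,
    pvFoldl_if_filter _ (fun i => pvD (pvWinS s.toList minSize i) ≤ maxLetters)]
  have : ((PySem.List.pyRange 0 ((s.toList.length : Int) - minSize + 1) 1).filter
        (fun i => decide (pvD (pvWinS s.toList minSize i) ≤ maxLetters))).foldl
      (fun cnt i => cnt.insert (String.ofList (pvWinS s.toList minSize i))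
        ((cnt.getD (String.ofList (pvWinS s.toList minSize i)) 0) + 1)) PySem.Dict.empty
      = PySem.Dict.counter (pvOccB s.toList maxLetters minSize
          ((s.toList.length : Int) - minSize + 1)) := by
    rw [← PySem.Dict.foldl_insert_getD_add_one_eq_counter]
    unfold pvOccB pvPredB
    rw [List.foldl_map]
  rw [this]

-- indicator predicates: "A counts window (st, |w|) and it equals w", "B counts window (i, minSize) = p"
def pvPA (cs : List Char) (maxLetters minSize maxSize : Int) (w : String) (st : Int) : Bool :=
  decide (((w.toList.length : Nat) : Int) < (cs.length : Int) - st + 1) &&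
  (String.ofList (pvWin cs st ((w.toList.length : Nat) : Int)) == w) &&
  pvCondF cs maxLetters minSize maxSize st ((w.toList.length : Nat) : Int)

def pvPB (cs : List Char) (maxLetters minSize : Int) (p : String) (i : Int) : Bool :=
  (String.ofList (pvWinS cs minSize i) == p) && pvPredB cs maxLetters minSize i

theorem pvLen_win (cs : List Char) (st L : Int) (h : st.toNat + L.toNat ≤ cs.length) :
    (pvWin cs st L).length = L.toNat := by
  unfold pvWin
  rw [List.length_take, List.length_drop]
  omega

theorem pvCountA (cs : List Char) (maxLetters minSize maxSize : Int) (w : String) :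
    (pvOccA cs maxLetters minSize maxSize).count w
      = List.countP (pvPA cs maxLetters minSize maxSize w)
          (PySem.List.pyRange 0 (cs.length : Int) 1) := by
  unfold pvOccA
  rw [List.count_flatMap, ← pvSum_indicator_eq_countP]
  congr 1
  apply List.map_congr_left
  intro st hst
  rw [PySem.List.mem_pyRange_one] at hst
  show List.count w (pvKeysA cs maxLetters minSize maxSize st) = _
  unfold pvKeysA
  rw [List.count_eq_countP, List.countP_map, List.countP_filter]
  have hsingle : ∀ L ∈ PySem.List.pyRange 0 ((cs.length : Int) - st + 1) 1,
      (((fun x => x == w) ∘ fun L' => String.ofList (pvWin cs st L')) L &&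
        pvCondF cs maxLetters minSize maxSize st L) = true →
      L = ((w.toList.length : Nat) : Int) := by
    intro L hL hp
    rw [PySem.List.mem_pyRange_one] at hL
    simp only [Function.comp, Bool.and_eq_true, beq_iff_eq] at hp
    have hwl : (pvWin cs st L).length = w.toList.length := by
      rw [← hp.1, String.toList_ofList]
    rw [pvLen_win cs st L (by omega)] at hwl
    omega
  rw [pvCountP_eq_single _ (PySem.List.nodup_pyRange_one _ _) _ _ hsingle]
  have hiff : (((w.toList.length : Nat) : Int) ∈
        PySem.List.pyRange 0 ((cs.length : Int) - st + 1) 1 ∧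
      (((fun x => x == w) ∘ fun L' => String.ofList (pvWin cs st L'))
          (((w.toList.length : Nat) : Int)) &&
        pvCondF cs maxLetters minSize maxSize st (((w.toList.length : Nat) : Int))) = true)
      ↔ pvPA cs maxLetters minSize maxSize w st = true := by
    rw [PySem.List.mem_pyRange_one]
    unfold pvPA
    simp only [Function.comp, Bool.and_eq_true, decide_eq_true_eq]
    constructor
    · rintro ⟨⟨_, h1⟩, h2, h3⟩; exact ⟨⟨h1, h2⟩, h3⟩
    · rintro ⟨⟨h1, h2⟩, h3⟩; exact ⟨⟨by positivity, h1⟩, h2, h3⟩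
  rw [if_congr hiff rfl rfl]

theorem pvCountB (cs : List Char) (maxLetters m hi : Int) (p : String) :
    (pvOccB cs maxLetters m hi).count p
      = List.countP (pvPB cs maxLetters m p) (PySem.List.pyRange 0 hi 1) := by
  unfold pvOccB
  rw [List.count_eq_countP, List.countP_map, List.countP_filter]
  apply List.countP_congr
  intro i _
  unfold pvPB
  simp [Function.comp]

-- every string B counts has length exactly minSize (1 ≤ minSize case)
theorem pvOccB_len (cs : List Char) (maxLetters L0 hi : Int) (h1 : 1 ≤ L0)
    (hhi : hi ≤ (cs.length : Int) - L0 + 1)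
    (p : String) (hp : p ∈ pvOccB cs maxLetters L0 hi) :
    ((p.toList.length : Nat) : Int) = L0 := by
  unfold pvOccB at hp
  rcases List.mem_map.mp hp with ⟨i, hi', rfl⟩
  have hi'' := List.mem_filter.mp hi'
  rw [PySem.List.mem_pyRange_one] at hi''
  rw [String.toList_ofList, pvWinS_eq_win cs L0 i (by omega) (by omega),
    pvLen_win cs i L0 (by omega)]
  omega

-- each window A counts is dominated by its length-minSize prefix, which B counts
theorem pvPA_to_PB (cs : List Char) (maxLetters minSize maxSize : Int) (h1 : 1 ≤ minSize)
    (w : String) (st : Int) (hst : 0 ≤ st)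
    (h : pvPA cs maxLetters minSize maxSize w st = true) :
    st < (cs.length : Int) - minSize + 1 ∧
      pvPB cs maxLetters minSize (String.ofList (w.toList.take minSize.toNat)) st = true := by
  unfold pvPA pvCondF at h
  simp only [Bool.and_eq_true, decide_eq_true_eq, beq_iff_eq] at h
  obtain ⟨⟨hlen, hw⟩, ⟨hd, hmx⟩, hmn⟩ := h
  have hwl : pvWin cs st ((w.toList.length : Nat) : Int) = w.toList := by
    have := congrArg String.toList hw
    rwa [String.toList_ofList] at this
  have hwin : pvWin cs st minSize = w.toList.take minSize.toNat := by
    rw [← hwl]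
    unfold pvWin
    rw [List.take_take]
    congr 1
    omega
  refine ⟨by omega, ?_⟩
  unfold pvPB pvPredB
  rw [pvWinS_eq_win cs minSize st hst (by omega)]
  simp only [Bool.and_eq_true, decide_eq_true_eq, beq_iff_eq]
  constructor
  · rw [hwin]
  · calc pvD (pvWin cs st minSize)
        ≤ pvD (pvWin cs st ((w.toList.length : Nat) : Int)) := pvD_win_mono cs st hmn
      _ ≤ maxLetters := hd

-- each length-minSize window B counts is counted by A as well
theorem pvPB_to_PA (cs : List Char) (maxLetters minSize maxSize : Int) (h1 : 1 ≤ minSize)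
    (h2 : minSize ≤ maxSize)
    (p : String) (hlen : ((p.toList.length : Nat) : Int) = minSize) (st : Int)
    (hst : 0 ≤ st) (hm : st < (cs.length : Int) - minSize + 1)
    (h : pvPB cs maxLetters minSize p st = true) :
    pvPA cs maxLetters minSize maxSize p st = true := by
  unfold pvPB pvPredB at h
  rw [pvWinS_eq_win cs minSize st hst (by omega)] at h
  simp only [Bool.and_eq_true, decide_eq_true_eq, beq_iff_eq] at h
  unfold pvPA pvCondF
  simp only [Bool.and_eq_true, decide_eq_true_eq, beq_iff_eq, hlen]
  exact ⟨⟨by omega, h.1⟩, ⟨h.2, h2⟩, le_rfl⟩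

theorem pvMain (cs : List Char) (maxLetters minSize maxSize : Int)
    (h1 : 1 ≤ minSize) (h2 : minSize ≤ maxSize) :
    pvMval (pvOccA cs maxLetters minSize maxSize)
      = pvMval (pvOccB cs maxLetters minSize ((cs.length : Int) - minSize + 1)) := by
  apply le_antisymm
  · by_cases hA : pvOccA cs maxLetters minSize maxSize = []
    · rw [hA]
      exact le_trans (le_of_eq rfl) (pvMval_nonneg _)
    · obtain ⟨w, hw, hmv⟩ := pvMval_exists _ hA
      rw [hmv]
      have hposA : 0 < (pvOccA cs maxLetters minSize maxSize).count w :=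
        List.count_pos_iff.mpr hw
      have key : (pvOccA cs maxLetters minSize maxSize).count w
          ≤ (pvOccB cs maxLetters minSize ((cs.length : Int) - minSize + 1)).count
              (String.ofList (w.toList.take minSize.toNat)) := by
        rw [pvCountA, pvCountB]
        by_cases hm : (cs.length : Int) - minSize + 1 ≤ 0
        · have hz : List.countP (pvPA cs maxLetters minSize maxSize w)
              (PySem.List.pyRange 0 (cs.length : Int) 1) = 0 := by
            rw [List.countP_eq_zero]
            intro st hst hpa
            rw [PySem.List.mem_pyRange_one] at hst
            have := (pvPA_to_PB cs maxLetters minSize maxSize h1 w st hst.1 hpa).1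
            omega
          rw [hz]
          exact Nat.zero_le _
        · rw [not_le] at hm
          rw [PySem.List.pyRange_one_append 0 ((cs.length : Int) - minSize + 1)
            (cs.length : Int) (by omega) (by omega), List.countP_append]
          have hz : List.countP (pvPA cs maxLetters minSize maxSize w)
              (PySem.List.pyRange ((cs.length : Int) - minSize + 1) (cs.length : Int) 1)
                = 0 := by
            rw [List.countP_eq_zero]
            intro st hst hpa
            rw [PySem.List.mem_pyRange_one] at hst
            have := (pvPA_to_PB cs maxLetters minSize maxSize h1 w st (by omega) hpa).1
            omega
          rw [hz, Nat.add_zero]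
          apply List.countP_mono_left
          intro st hst hpa
          rw [PySem.List.mem_pyRange_one] at hst
          exact (pvPA_to_PB cs maxLetters minSize maxSize h1 w st hst.1 hpa).2
      have hpB : String.ofList (w.toList.take minSize.toNat) ∈ pvOccB cs maxLetters minSize ((cs.length : Int) - minSize + 1) :=
        List.count_pos_iff.mp (lt_of_lt_of_le hposA key)
      calc ((pvOccA cs maxLetters minSize maxSize).count w : Int)
          ≤ ((pvOccB cs maxLetters minSize ((cs.length : Int) - minSize + 1)).count
              (String.ofList (w.toList.take minSize.toNat)) : Int) := by exact_mod_cast key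
        _ ≤ pvMval (pvOccB cs maxLetters minSize ((cs.length : Int) - minSize + 1)) := pvMval_count_le _ _ hpB
  · by_cases hB : pvOccB cs maxLetters minSize ((cs.length : Int) - minSize + 1) = []
    · rw [hB]
      exact le_trans (le_of_eq rfl) (pvMval_nonneg _)
    · obtain ⟨p, hp, hmv⟩ := pvMval_exists _ hB
      rw [hmv]
      have hlen := pvOccB_len cs maxLetters minSize ((cs.length : Int) - minSize + 1) h1 le_rfl p hp
      have hm : 0 < (cs.length : Int) - minSize + 1 := by
        unfold pvOccB at hp
        rcases List.mem_map.mp hp with ⟨i, hi, _⟩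
        have := (List.mem_filter.mp hi).1
        rw [PySem.List.mem_pyRange_one] at this
        omega
      have key : (pvOccB cs maxLetters minSize ((cs.length : Int) - minSize + 1)).count p
          ≤ (pvOccA cs maxLetters minSize maxSize).count p := by
        rw [pvCountA, pvCountB]
        rw [PySem.List.pyRange_one_append 0 ((cs.length : Int) - minSize + 1)
          (cs.length : Int) (by omega) (by omega), List.countP_append]
        have hmono : List.countP (pvPB cs maxLetters minSize p)
            (PySem.List.pyRange 0 ((cs.length : Int) - minSize + 1) 1)
            ≤ List.countP (pvPA cs maxLetters minSize maxSize p)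
              (PySem.List.pyRange 0 ((cs.length : Int) - minSize + 1) 1) := by
          apply List.countP_mono_left
          intro st hst hpb
          rw [PySem.List.mem_pyRange_one] at hst
          exact pvPB_to_PA cs maxLetters minSize maxSize h1 h2 p hlen st hst.1 hst.2 hpb
        omega
      have hposB : 0 < (pvOccB cs maxLetters minSize ((cs.length : Int) - minSize + 1)).count p := List.count_pos_iff.mpr hp
      have hpA : p ∈ pvOccA cs maxLetters minSize maxSize :=
        List.count_pos_iff.mp (lt_of_lt_of_le hposB key)
      calc ((pvOccB cs maxLetters minSize ((cs.length : Int) - minSize + 1)).count p : Int)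
          ≤ ((pvOccA cs maxLetters minSize maxSize).count p : Int) := by exact_mod_cast key
        _ ≤ pvMval (pvOccA cs maxLetters minSize maxSize) := pvMval_count_le _ _ hpA

-- with infeasible parameters A counts nothing
theorem pvOccA_nil (cs : List Char) (maxLetters minSize maxSize : Int)
    (hg : max minSize 0 > maxSize ∨ maxLetters < 0) :
    pvOccA cs maxLetters minSize maxSize = [] := by
  unfold pvOccA
  rw [List.flatMap_eq_nil_iff]
  intro st _
  unfold pvKeysA
  rw [List.map_eq_nil_iff, List.filter_eq_nil_iff]
  intro L hL
  rw [PySem.List.mem_pyRange_one] at hL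
  unfold pvCondF
  have hd : 0 ≤ pvD (pvWin cs st L) := pvD_nonneg _
  rcases hg with h | h
  · simp only [Bool.and_eq_true, decide_eq_true_eq, not_and]
    intro _ _
    omega
  · simp only [Bool.and_eq_true, decide_eq_true_eq, not_and]
    intro h' _
    omega

-- on the empty string A counts nothing
theorem pvOccA_nil_empty (maxLetters minSize maxSize : Int) :
    pvOccA ("" : String).toList maxLetters minSize maxSize = [] := by
  unfold pvOccA
  have h : PySem.List.pyRange 0 (((("" : String).toList).length : Int)) 1 = [] := by decide
  rw [h]
  rfl

-- inside D_, A counts the empty slice at every scanned start position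
theorem pvOccA_mem_empty (cs : List Char) (maxLetters minSize maxSize : Int)
    (h0 : minSize ≤ 0) (hL : 0 ≤ maxLetters) (hx : 0 ≤ maxSize) (hn : cs ≠ []) :
    ("" : String) ∈ pvOccA cs maxLetters minSize maxSize := by
  have hn' : 0 < cs.length := List.length_pos_iff.mpr hn
  refine List.mem_flatMap.mpr ⟨0, ?_, ?_⟩
  · rw [PySem.List.mem_pyRange_one]
    constructor
    · exact le_rfl
    · exact_mod_cast hn'
  · unfold pvKeysA
    refine List.mem_map.mpr ⟨0, List.mem_filter.mpr ⟨?_, ?_⟩, ?_⟩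
    · rw [PySem.List.mem_pyRange_one]
      refine ⟨le_rfl, ?_⟩
      have : (0:Int) < (cs.length : Int) := by exact_mod_cast hn'
      omega
    · unfold pvCondF
      have hwin : pvWin cs 0 0 = [] := rfl
      rw [hwin]
      simp only [Bool.and_eq_true, decide_eq_true_eq]
      refine ⟨⟨?_, hx⟩, h0⟩
      simpa [pvD] using hL
    · rfl

-- ===== VERDICT (by name: the statement is the Claim_ definition above) =====
theorem maxFreq2_spec : Claim_unchanged_maxFreq2 := by
  intro s maxLetters minSize maxSize _
  unfold Spec_maxFreq2 D_maxFreq2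
  intro hnd
  by_cases hc : 0 < minSize ∧ minSize ≤ maxSize
  · rw [pvA_eq, pvB_eq s maxLetters minSize maxSize hc]
    exact pvMain s.toList maxLetters minSize maxSize hc.1 hc.2
  · have hB : maxFreq2_alt s maxLetters minSize maxSize = 0 := by
      unfold maxFreq2_alt
      dsimp only
      rw [if_pos hc]
    rw [hB, pvA_eq]
    by_cases h0 : minSize ≤ 0
    · by_cases hmL : maxLetters < 0
      · rw [pvOccA_nil s.toList maxLetters minSize maxSize (Or.inr hmL)]
        rfl
      · by_cases hmx : maxSize < 0
        · rw [pvOccA_nil s.toList maxLetters minSize maxSize (Or.inl (by omega))]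
          rfl
        · have hs : s = "" := by
            by_contra hne
            exact hnd ⟨h0, by omega, by omega, hne⟩
          rw [hs, pvOccA_nil_empty]
          rfl
    · have hms : maxSize < minSize := by
        rcases not_and_or.mp hc with h | h
        · omega
        · omega
      rw [pvOccA_nil s.toList maxLetters minSize maxSize (Or.inl (by omega))]
      rfl

theorem maxFreq2_changed : Claim_changed_maxFreq2 := by
  unfold Claim_changed_maxFreq2; decide

theorem maxFreq2_tight : Claim_exact_maxFreq2 := by
  intro s maxLetters minSize maxSize _ hD
  obtain ⟨h0, hL, hx, hs⟩ := hD
  have hB : maxFreq2_alt s maxLetters minSize maxSize = 0 := by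
    unfold maxFreq2_alt
    dsimp only
    rw [if_pos (by rintro ⟨h, _⟩; omega)]
  have hn : s.toList ≠ [] := by
    intro h
    exact hs (by simpa using congrArg String.ofList h)
  have hmem := pvOccA_mem_empty s.toList maxLetters minSize maxSize h0 hL hx hn
  have hcnt : 0 < (pvOccA s.toList maxLetters minSize maxSize).count "" :=
    List.count_pos_iff.mpr hmem
  have hle := pvMval_count_le (pvOccA s.toList maxLetters minSize maxSize) "" hmem
  have h1 : (1 : Int) ≤ ((pvOccA s.toList maxLetters minSize maxSize).count "" : Int) := by
    exact_mod_cast hcnt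
  rw [pvA_eq, hB]
  omega
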